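-- pv_equiv track=rewrite | github.com/tamlhp/2801ict | week-3/problem-set/prob1.py | determine_topology
-- ===== SOURCE A (Python) =====
-- def determine_topology(A):
--     n = len(A)
--
--     # Check for Ring Topology
--     is_ring = True
--     for i in range(n):
--         neighbors = 0
--         for j in range(n):
--             if A[i][j]:
--                 neighbors += 1
--         if neighbors != 2:
--             if i == 0 or i == n-1:
--                 if neighbors != 1:
--                     is_ring = False
--             else:
--                 is_ring = False
--     if is_ring:
--         return "Ring Topology"
--
--     # Check for Star Topology
--     is_star = True
--     center = -1
--     for i in range(n):
--         neighbors = 0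
--         for j in range(n):
--             if A[i][j]:
--                 neighbors += 1
--         if neighbors == n-1:
--             if center == -1:
--                 center = i
--             else:
--                 is_star = False
--         elif i != center:
--             if neighbors != 1:
--                 is_star = False
--     if is_star:
--         return "Star Topology"
--
--     # Check for Fully Connected Mesh Topology
--     is_fully_connected_mesh = True
--     for i in range(n):
--         for j in range(n):
--             if i != j and not A[i][j]:
--                 is_fully_connected_mesh = False
--     if is_fully_connected_mesh:
--         return "Fully Connected Mesh Topology"
--
--     return "Unknown Topology"
-- ===== SOURCE B (Python) =====
-- def determine_topology(A):
--     n = len(A)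
--     ring = star = mesh = True
--     hubs = 0
--     for i, row in enumerate(A):
--         d = sum(1 for j in range(n) if row[j])
--         if not (d == 2 or (d == 1 and (i == 0 or i == n - 1))):
--             ring = False
--         if d == n - 1:
--             hubs += 1
--         elif d != 1:
--             star = False
--         if d - (1 if row[i] else 0) != n - 1:
--             mesh = False
--     if ring:
--         return "Ring Topology"
--     if star and hubs <= 1:
--         return "Star Topology"
--     if mesh:
--         return "Fully Connected Mesh Topology"
--     return "Unknown Topology"
-- ===== Notes on version B (the rewrite author's own statement) =====
-- stated objective: alternative
-- what changed: B replaces A's three staged matrix scans by one fused pass per row: the star check becomes a hub counter instead of A's sequential center bookkeeping, and the mesh check is decided arithmetically from the row degree minus the diagonal entry instead of A's second full cell scan; Pre_ excludes rows shorter than len(A), on which A raises IndexError.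
import Mathlib
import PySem

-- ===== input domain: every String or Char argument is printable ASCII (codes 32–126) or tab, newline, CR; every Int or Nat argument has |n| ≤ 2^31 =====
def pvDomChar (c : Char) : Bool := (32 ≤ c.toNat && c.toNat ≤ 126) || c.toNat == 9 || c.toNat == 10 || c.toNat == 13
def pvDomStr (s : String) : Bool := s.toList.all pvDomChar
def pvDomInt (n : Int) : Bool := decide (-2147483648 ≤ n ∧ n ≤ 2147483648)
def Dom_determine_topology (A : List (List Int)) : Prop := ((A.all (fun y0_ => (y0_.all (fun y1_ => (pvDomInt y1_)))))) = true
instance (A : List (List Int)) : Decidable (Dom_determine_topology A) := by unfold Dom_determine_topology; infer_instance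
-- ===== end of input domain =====

-- B fuses A's three staged matrix scans into one pass per row (hub counter for the star
-- check instead of A's center bookkeeping, mesh decided from degree minus diagonal);
-- objective: alternative.

-- ===== PORT A =====
-- inner 'for j in range(n): if A[i][j]: neighbors += 1' loop of A
def nbA (A : List (List Int)) (i : Int) : Int :=
  (PySem.List.pyRange 0 (A.length : Int) 1).foldl
    (fun c j => if PySem.List.pyGetD (PySem.List.pyGetD A i []) j 0 ≠ 0 then c + 1 else c) 0

-- A's ring loop over i, accumulator is_ring
def ringA (A : List (List Int)) : Bool :=
  (PySem.List.pyRange 0 (A.length : Int) 1).foldl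
    (fun b i =>
      if nbA A i ≠ 2 then
        if i = 0 ∨ i = (A.length : Int) - 1 then
          (if nbA A i ≠ 1 then false else b)
        else false
      else b) true

-- A's star loop over i, accumulator (is_star, center)
def starA (A : List (List Int)) : Bool × Int :=
  (PySem.List.pyRange 0 (A.length : Int) 1).foldl
    (fun sc i =>
      if nbA A i = (A.length : Int) - 1 then
        (if sc.2 = -1 then (sc.1, i) else (false, sc.2))
      else if i ≠ sc.2 then
        (if nbA A i ≠ 1 then (false, sc.2) else sc)
      else sc) (true, -1)

-- A's mesh double loop, accumulator is_fully_connected_mesh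
def meshA (A : List (List Int)) : Bool :=
  (PySem.List.pyRange 0 (A.length : Int) 1).foldl
    (fun b i =>
      (PySem.List.pyRange 0 (A.length : Int) 1).foldl
        (fun b' j =>
          if i ≠ j ∧ PySem.List.pyGetD (PySem.List.pyGetD A i []) j 0 = 0 then false else b') b) true

def determine_topology (A : List (List Int)) : String :=
  if ringA A then "Ring Topology"
  else if (starA A).1 then "Star Topology"
  else if meshA A then "Fully Connected Mesh Topology"
  else "Unknown Topology"

-- ===== PORT B =====
-- d = sum(1 for j in range(n) if row[j])
def dB (n : Int) (row : List Int) : Int :=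
  (PySem.List.pyRange 0 n 1).foldl
    (fun c j => if PySem.List.pyGetD row j 0 ≠ 0 then c + 1 else c) 0

-- one iteration of B's fused loop; state = (ring, hubs, star, mesh)
def stepB (n : Int) (st : Bool × Int × Bool × Bool) (p : Int × List Int) : Bool × Int × Bool × Bool :=
  let d := dB n p.2
  let ring := if ¬ (d = 2 ∨ (d = 1 ∧ (p.1 = 0 ∨ p.1 = n - 1))) then false else st.1
  let hubs := if d = n - 1 then st.2.1 + 1 else st.2.1
  let star := if d = n - 1 then st.2.2.1 else (if d ≠ 1 then false else st.2.2.1)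
  let mesh := if d - (if PySem.List.pyGetD p.2 p.1 0 ≠ 0 then 1 else 0) ≠ n - 1 then false else st.2.2.2
  (ring, hubs, star, mesh)

-- state after B's loop, started from (True, 0, True, True)
def stB (A : List (List Int)) : Bool × Int × Bool × Bool :=
  (PySem.List.enumerate A).foldl (stepB (A.length : Int)) (true, 0, true, true)

def determine_topology_alt (A : List (List Int)) : String :=
  if (stB A).1 then "Ring Topology"
  else if (stB A).2.2.1 && decide ((stB A).2.1 ≤ 1) then "Star Topology"
  else if (stB A).2.2.2 then "Fully Connected Mesh Topology"
  else "Unknown Topology"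

-- ===== PRECONDITION & SPEC =====
-- Pre_ excludes only the inputs where A raises IndexError: a row shorter than len(A).
def Pre_determine_topology (A : List (List Int)) : Prop :=
  ∀ row ∈ A, A.length ≤ row.length
instance (A : List (List Int)) : Decidable (Pre_determine_topology A) := by
  unfold Pre_determine_topology; infer_instance

def pvWitness_determine_topology : List (List Int) := [[0, 1], [1, 0]]

def Spec_determine_topology (A : List (List Int)) (out : String) : Prop := out = determine_topology_alt A
instance (A : List (List Int)) (out : String) : Decidable (Spec_determine_topology A out) := by unfold Spec_determine_topology; infer_instance

-- ===== CLAIM (what is proved, stated in full; the proofs are below) =====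
def Claim_equal_determine_topology : Prop := ∀ (A : List (List Int)), Dom_determine_topology A → Pre_determine_topology A → Spec_determine_topology A (determine_topology A)

-- ===== LEMMAS AND PROOFS =====

lemma foldl_if_bool {ι : Type} (q : ι → Prop) [DecidablePred q] (l : List ι) (b : Bool) :
    l.foldl (fun b i => if q i then b else false) b = (b && l.all (fun i => decide (q i))) := by
  induction l generalizing b with
  | nil => simp
  | cons x t ih =>
    rw [List.foldl_cons]
    by_cases h : q x
    · rw [show (if q x then b else false) = b from if_pos h, ih]
      simp [h]
    · rw [show (if q x then b else false) = false from if_neg h, ih]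
      simp [h]

lemma foldl_and_bool {ι : Type} (q : ι → Bool) (l : List ι) (b : Bool) :
    l.foldl (fun b i => b && q i) b = (b && l.all q) := by
  induction l generalizing b with
  | nil => simp
  | cons x t ih => rw [List.foldl_cons, ih]; simp [Bool.and_assoc]

lemma all_congr_mem {ι : Type} {p q : ι → Bool} (l : List ι) (h : ∀ x ∈ l, p x = q x) :
    l.all p = l.all q := by
  induction l with
  | nil => rfl
  | cons x t ih =>
    simp only [List.all_cons, h x (List.mem_cons_self ..),
      ih (fun y hy => h y (List.mem_cons_of_mem _ hy))]

lemma nbA_dB (A : List (List Int)) (i : Int) :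
    nbA A i = dB (A.length : Int) (PySem.List.pyGetD A i []) := rfl

lemma ite_not_and (P : Prop) [Decidable P] (m t : Bool) :
    ((if ¬ P then false else m) && t) = (m && (decide P && t)) := by
  by_cases h : P <;> simp [h]

-- ---- B's fused fold, characterised component-wise ----
lemma fusedB (n : Int) (l : List (Int × List Int)) :
    ∀ (r : Bool) (h : Int) (s m : Bool),
    l.foldl (stepB n) (r, h, s, m) =
      (r && l.all (fun p => decide (dB n p.2 = 2 ∨ (dB n p.2 = 1 ∧ (p.1 = 0 ∨ p.1 = n - 1)))),
       h + (l.countP (fun p => decide (dB n p.2 = n - 1)) : Int),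
       s && l.all (fun p => decide (dB n p.2 = n - 1 ∨ dB n p.2 = 1)),
       m && l.all (fun p => decide (dB n p.2 - (if PySem.List.pyGetD p.2 p.1 0 ≠ 0 then 1 else 0) = n - 1))) := by
  induction l with
  | nil => intro r h s m; simp
  | cons p t ih =>
    intro r h s m
    rw [List.foldl_cons, show stepB n (r, h, s, m) p =
      (if ¬ (dB n p.2 = 2 ∨ (dB n p.2 = 1 ∧ (p.1 = 0 ∨ p.1 = n - 1))) then false else r,
       if dB n p.2 = n - 1 then h + 1 else h,
       if dB n p.2 = n - 1 then s else (if dB n p.2 ≠ 1 then false else s),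
       if dB n p.2 - (if PySem.List.pyGetD p.2 p.1 0 ≠ 0 then 1 else 0) ≠ n - 1 then false else m) from rfl,
      ih]
    simp only [List.all_cons, List.countP_cons]
    refine Prod.ext ?_ (Prod.ext ?_ (Prod.ext ?_ ?_))
    · exact ite_not_and _ r _
    · by_cases hc : dB n p.2 = n - 1 <;> simp [hc] <;> push_cast <;> ring
    · by_cases hc : dB n p.2 = n - 1
      · simp [hc]
      · by_cases h1 : dB n p.2 = 1 <;> simp [hc, h1]
    · exact ite_not_and _ m _

-- ---- ring ----
lemma ringA_all (A : List (List Int)) :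
    ringA A = (PySem.List.pyRange 0 (A.length : Int) 1).all
      (fun i => decide (nbA A i = 2 ∨ (nbA A i = 1 ∧ (i = 0 ∨ i = (A.length : Int) - 1)))) := by
  unfold ringA
  rw [PySem.List.foldl_congr_mem'
    (g := fun (b : Bool) (i : Int) =>
      if (nbA A i = 2 ∨ (nbA A i = 1 ∧ (i = 0 ∨ i = (A.length : Int) - 1))) then b else false)]
  · rw [foldl_if_bool]; simp
  · intro i _ b
    split_ifs <;> tauto

-- ---- star: A's sequential center fold = count ≤ 1 && degrees all hub-or-one ----
lemma pb_cons_center (g : Int → Int) (m i : Int) (t : List Int) (hm : g i = m) :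
    (decide (List.countP (fun j => decide (g j = m)) (i :: t) ≤ 1)
      && (i :: t).all (fun j => decide (g j = m ∨ g j = 1)))
    = t.all (fun j => decide (g j ≠ m ∧ g j = 1)) := by
  have hcc : List.countP (fun j => decide (g j = m)) (i :: t)
      = List.countP (fun j => decide (g j = m)) t + 1 := by
    simp [hm]
  rw [Bool.eq_iff_iff]
  simp only [Bool.and_eq_true, decide_eq_true_eq, List.all_eq_true, hcc, List.mem_cons]
  constructor
  · rintro ⟨hcnt, hall⟩ j hj
    have h0 : List.countP (fun j => decide (g j = m)) t = 0 := by omega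
    have hne := List.countP_eq_zero.1 h0 j hj
    simp only [decide_eq_true_eq] at hne
    rcases hall j (Or.inr hj) with h | h
    · exact absurd h hne
    · exact ⟨hne, h⟩
  · intro h
    have h0 : List.countP (fun j => decide (g j = m)) t = 0 :=
      List.countP_eq_zero.2 (fun j hj => by simp [(h j hj).1])
    refine ⟨by omega, ?_⟩
    rintro j (rfl | hj)
    · exact Or.inl hm
    · exact Or.inr (h j hj).2

lemma pb_cons_other (g : Int → Int) (m i : Int) (t : List Int) (hm : g i ≠ m) :
    (decide (List.countP (fun j => decide (g j = m)) (i :: t) ≤ 1)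
      && (i :: t).all (fun j => decide (g j = m ∨ g j = 1)))
    = (decide (g i = 1) &&
        (decide (List.countP (fun j => decide (g j = m)) t ≤ 1)
          && t.all (fun j => decide (g j = m ∨ g j = 1)))) := by
  have h1 : (decide (g i = m ∨ g i = 1)) = decide (g i = 1) := by
    by_cases h : g i = 1 <;> simp [h, hm]
  have hcc : List.countP (fun j => decide (g j = m)) (i :: t)
      = List.countP (fun j => decide (g j = m)) t := by
    simp [hm]
  simp only [hcc, List.all_cons, h1]
  rw [Bool.and_left_comm]

lemma star_fold (g : Int → Int) (m : Int) :
    ∀ (l : List Int) (s : Bool) (c : Int),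
    l.Pairwise (· < ·) → (∀ i ∈ l, c ≠ i) → (∀ i ∈ l, i ≠ -1) →
    (l.foldl (fun (sc : Bool × Int) i =>
        if g i = m then (if sc.2 = -1 then (sc.1, i) else (false, sc.2))
        else if i ≠ sc.2 then (if g i ≠ 1 then (false, sc.2) else sc) else sc) (s, c)).1
    = (s && (if c = -1
        then (decide (l.countP (fun i => decide (g i = m)) ≤ 1)
              && l.all (fun i => decide (g i = m ∨ g i = 1)))
        else l.all (fun i => decide (g i ≠ m ∧ g i = 1)))) := by
  intro l
  induction l with
  | nil => intro s c _ _ _; by_cases hc : c = -1 <;> simp [hc]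
  | cons i t ih =>
    intro s c hpw h2 h3
    have hci : c ≠ i := h2 i (List.mem_cons_self ..)
    have hi1 : i ≠ -1 := h3 i (List.mem_cons_self ..)
    have hpw' : t.Pairwise (· < ·) := hpw.tail
    have hlt : ∀ j ∈ t, i < j := fun j hj => (List.pairwise_cons.1 hpw).1 j hj
    have h2' : ∀ j ∈ t, c ≠ j := fun j hj => h2 j (List.mem_cons_of_mem _ hj)
    have h3' : ∀ j ∈ t, j ≠ -1 := fun j hj => h3 j (List.mem_cons_of_mem _ hj)
    rw [List.foldl_cons]
    show (t.foldl _
      (if g i = m then (if c = -1 then (s, i) else (false, c))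
       else if i ≠ c then (if g i ≠ 1 then (false, c) else (s, c)) else (s, c))).1 = _
    by_cases hm : g i = m
    · rw [if_pos hm]
      by_cases hc : c = -1
      · rw [if_pos hc, ih s i hpw' (fun j hj => ne_of_lt (hlt j hj)) h3',
          if_neg hi1, if_pos hc, pb_cons_center g m i t hm]
      · rw [if_neg hc, ih false c hpw' h2' h3', if_neg hc, if_neg hc]
        simp [List.all_cons, hm]
    · rw [if_neg hm, if_pos (Ne.symm hci)]
      by_cases h1 : g i = 1
      · rw [if_neg (by simp [h1]), ih s c hpw' h2' h3']
        by_cases hc : c = -1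
        · rw [if_pos hc, if_pos hc, pb_cons_other g m i t hm]
          simp [h1]
        · have hm1 : (1 : Int) ≠ m := by rw [← h1]; exact hm
          rw [if_neg hc, if_neg hc, List.all_cons]
          simp [h1, hm1]
      · rw [if_pos (by simp [h1]), ih false c hpw' h2' h3']
        by_cases hc : c = -1
        · rw [if_pos hc, if_pos hc, pb_cons_other g m i t hm]
          simp [h1]
        · rw [if_neg hc, if_neg hc, List.all_cons]
          simp [h1]

lemma starA_count (A : List (List Int)) :
    (starA A).1 =
      (decide ((PySem.List.pyRange 0 (A.length : Int) 1).countP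
          (fun i => decide (nbA A i = (A.length : Int) - 1)) ≤ 1)
        && (PySem.List.pyRange 0 (A.length : Int) 1).all
          (fun i => decide (nbA A i = (A.length : Int) - 1 ∨ nbA A i = 1))) := by
  unfold starA
  rw [star_fold (fun i => nbA A i) ((A.length : Int) - 1)
      (PySem.List.pyRange 0 (A.length : Int) 1) true (-1)
      (PySem.List.pairwise_lt_pyRange_one 0 (A.length : Int))
      (fun i hi => by have := (PySem.List.mem_pyRange_one).1 hi; omega)
      (fun i hi => by have := (PySem.List.mem_pyRange_one).1 hi; omega)]
  rw [if_pos rfl, Bool.true_and]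

-- ---- mesh: A's cell scan = B's degree arithmetic ----
lemma meshA_all (A : List (List Int)) :
    meshA A = (PySem.List.pyRange 0 (A.length : Int) 1).all (fun i =>
      (PySem.List.pyRange 0 (A.length : Int) 1).all (fun j =>
        decide (i = j ∨ PySem.List.pyGetD (PySem.List.pyGetD A i []) j 0 ≠ 0))) := by
  unfold meshA
  rw [PySem.List.foldl_congr_mem'
    (g := fun (b : Bool) (i : Int) =>
      b && (PySem.List.pyRange 0 (A.length : Int) 1).all (fun j =>
        decide (i = j ∨ PySem.List.pyGetD (PySem.List.pyGetD A i []) j 0 ≠ 0)))]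
  · rw [foldl_and_bool]; simp
  · intro i _ b
    rw [PySem.List.foldl_congr_mem'
      (g := fun (b' : Bool) (j : Int) =>
        if (i = j ∨ PySem.List.pyGetD (PySem.List.pyGetD A i []) j 0 ≠ 0) then b' else false)]
    · rw [foldl_if_bool]
    · intro j _ b'
      split_ifs <;> tauto

-- countP p - diag = length - 1  ↔  every non-i element satisfies p  (l nodup, i ∈ l)
lemma mesh_row_iff (l : List Int) (p : Int → Bool) (i : Int)
    (hnd : l.Nodup) (hi : i ∈ l) :
    ((l.countP p : Int) - (if p i = true then 1 else 0) = (l.length : Int) - 1)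
    ↔ (∀ j ∈ l, i = j ∨ p j = true) := by
  induction l with
  | nil => cases hi
  | cons h t ih =>
    have hht : h ∉ t := (List.nodup_cons.1 hnd).1
    have hnd' : t.Nodup := (List.nodup_cons.1 hnd).2
    rcases List.mem_cons.1 hi with rfl | hit
    · have hlen : t.countP p ≤ t.length := t.countP_le_length
      have hall := (List.countP_eq_length (l := t) (p := p))
      simp only [List.countP_cons, List.length_cons, List.mem_cons]
      constructor
      · intro hc j hj
        rcases hj with rfl | hj
        · exact Or.inl rfl
        · have : t.countP p = t.length := by split_ifs at hc <;> push_cast at hc <;> omega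
          exact Or.inr (hall.1 this j hj)
      · intro hj
        have : t.countP p = t.length := hall.2 (fun j hjt => by
          rcases hj j (Or.inr hjt) with rfl | hp
          · exact absurd hjt hht
          · exact hp)
        split_ifs with hp <;> push_cast <;> omega
    · have hih : i ∈ t := hit
      have hhi : h ≠ i := fun he => hht (he ▸ hih)
      have hlen : t.countP p ≤ t.length := t.countP_le_length
      have hpi : t.countP p = t.length → p i = true :=
        fun he => (List.countP_eq_length (l := t) (p := p)).1 he i hih
      have hiff := ih hnd' hih
      simp only [List.countP_cons, List.length_cons, List.mem_cons]
      constructor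
      · intro hc
        by_cases hph : p h = true
        · intro j hj
          rcases hj with rfl | hj
          · exact Or.inr hph
          · refine (hiff.1 ?_) j hj
            rw [if_pos hph] at hc
            split_ifs at hc ⊢ <;> push_cast at hc ⊢ <;> omega
        · exfalso
          rw [if_neg hph] at hc
          by_cases hpi' : p i = true
          · rw [if_pos hpi'] at hc; push_cast at hc; omega
          · rw [if_neg hpi'] at hc; push_cast at hc
            exact hpi' (hpi (by omega))
      · intro hj
        have hph : p h = true := by
          rcases hj h (Or.inl rfl) with rfl | hp
          · exact absurd rfl hhi
          · exact hp
        have ht' := hiff.2 (fun j hjt => hj j (Or.inr hjt))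
        rw [if_pos hph]
        split_ifs at ht' ⊢ <;> push_cast at ht' ⊢ <;> omega

lemma dB_countP (A : List (List Int)) (row : List Int) :
    dB (A.length : Int) row
      = ((PySem.List.pyRange 0 (A.length : Int) 1).countP
          (fun j => decide (PySem.List.pyGetD row j 0 ≠ 0)) : Int) := by
  unfold dB
  rw [PySem.List.foldl_ite_add_one]
  ring

lemma mesh_pointwise (A : List (List Int)) (i : Int)
    (hi : i ∈ PySem.List.pyRange 0 (A.length : Int) 1) :
    decide (dB (A.length : Int) (PySem.List.pyGetD A i [])
        - (if PySem.List.pyGetD (PySem.List.pyGetD A i []) i 0 ≠ 0 then 1 else 0)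
        = (A.length : Int) - 1)
    = (PySem.List.pyRange 0 (A.length : Int) 1).all (fun j =>
        decide (i = j ∨ PySem.List.pyGetD (PySem.List.pyGetD A i []) j 0 ≠ 0)) := by
  have hlen : ((PySem.List.pyRange 0 (A.length : Int) 1).length : Int) = (A.length : Int) := by
    rw [PySem.List.length_pyRange_one]; omega
  have h := mesh_row_iff (PySem.List.pyRange 0 (A.length : Int) 1)
      (fun j => decide (PySem.List.pyGetD (PySem.List.pyGetD A i []) j 0 ≠ 0)) i
      (PySem.List.nodup_pyRange_one 0 (A.length : Int)) hi
  rw [hlen] at h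
  rw [Bool.eq_iff_iff, decide_eq_true_eq, List.all_eq_true, dB_countP]
  simpa using h

-- ===== VERDICT (by name: the statement is the Claim_ definition above) =====
theorem determine_topology_spec : Claim_equal_determine_topology := by
  intro A _hdom _hpre
  unfold Spec_determine_topology determine_topology determine_topology_alt stB
  rw [PySem.List.enumerate_eq_map_pyRange (d := []), PySem.List.len_eq, fusedB]
  simp only [List.all_map, List.countP_map, Function.comp_def, Bool.true_and, Int.zero_add]
  rw [ringA_all, starA_count, meshA_all]
  rw [all_congr_mem (p := fun i =>
        (PySem.List.pyRange 0 (A.length : Int) 1).all (fun j =>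
          decide (i = j ∨ PySem.List.pyGetD (PySem.List.pyGetD A i []) j 0 ≠ 0)))
      (q := fun i => decide (dB (A.length : Int) (PySem.List.pyGetD A i [])
        - (if PySem.List.pyGetD (PySem.List.pyGetD A i []) i 0 ≠ 0 then 1 else 0)
        = (A.length : Int) - 1))
      _ (fun i hi => (mesh_pointwise A i hi).symm)]
  simp only [nbA_dB, Bool.and_comm]
  norm_cast
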